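-- pv_equiv track=rewrite | github.com/apostolovbg/devcovenant | devcovenant/core/metadata_runtime.py | _role_from_key
-- ===== SOURCE A (Python) =====
-- from typing import Dict, Iterable, List, Sequence, Tuple
--
-- _ROLE_SUFFIXES: Tuple[str, ...] = ("globs", "files", "dirs")
--
-- _LEGACY_SUFFIXES: Tuple[str, ...] = ("prefixes", "suffixes")
--
-- _LEGACY_ROLE_KEY = {
--     "include_globs": ("include", "globs"),
--     "exclude_globs": ("exclude", "globs"),
--     "force_include_globs": ("force_include", "globs"),
--     "include_files": ("include", "files"),
--     "exclude_files": ("exclude", "files"),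
--     "force_include_files": ("force_include", "files"),
--     "include_dirs": ("include", "dirs"),
--     "exclude_dirs": ("exclude", "dirs"),
--     "force_include_dirs": ("force_include", "dirs"),
--     "watch_globs": ("watch", "globs"),
--     "watch_files_files": ("watch_files", "files"),
--     "watch_files_globs": ("watch_files", "globs"),
--     "watch_files_dirs": ("watch_files", "dirs"),
--     "tests_watch_globs": ("tests_watch", "globs"),
--     "tests_watch_files": ("tests_watch", "files"),
--     "tests_watch_dirs": ("tests_watch", "dirs"),
-- }
--
-- def _role_from_key(key: str) -> Tuple[str, str] | None:
--     """Return (role, target) for selector-ish metadata keys."""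
--     if key in _LEGACY_ROLE_KEY:
--         return _LEGACY_ROLE_KEY[key]
--     for suffix in _ROLE_SUFFIXES:
--         marker = f"_{suffix}"
--         if key.endswith(marker):
--             return key[: -len(marker)], suffix
--     for legacy in _LEGACY_SUFFIXES:
--         marker = f"_{legacy}"
--         if key.endswith(marker):
--             return key[: -len(marker)], "globs"
--     return None
-- ===== SOURCE B (Python) =====
-- _TARGET_BY_TAIL = {
--     "globs": "globs",
--     "files": "files",
--     "dirs": "dirs",
--     "prefixes": "globs",
--     "suffixes": "globs",
-- }
--
-- def _role_from_key(key):
--     """Return (role, target) for selector-ish metadata keys."""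
--     head, sep, tail = key.rpartition("_")
--     if sep and tail in _TARGET_BY_TAIL:
--         return head, _TARGET_BY_TAIL[tail]
--     return None
-- ===== Notes on version B (the rewrite author's own statement) =====
-- stated objective: simpler
-- what changed: Drops the 16-entry legacy dict (all its entries coincide with the suffix logic) and replaces the two endswith/slice loops by a single split at the last underscore plus one 5-entry tail-to-target table lookup.
import Mathlib
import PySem

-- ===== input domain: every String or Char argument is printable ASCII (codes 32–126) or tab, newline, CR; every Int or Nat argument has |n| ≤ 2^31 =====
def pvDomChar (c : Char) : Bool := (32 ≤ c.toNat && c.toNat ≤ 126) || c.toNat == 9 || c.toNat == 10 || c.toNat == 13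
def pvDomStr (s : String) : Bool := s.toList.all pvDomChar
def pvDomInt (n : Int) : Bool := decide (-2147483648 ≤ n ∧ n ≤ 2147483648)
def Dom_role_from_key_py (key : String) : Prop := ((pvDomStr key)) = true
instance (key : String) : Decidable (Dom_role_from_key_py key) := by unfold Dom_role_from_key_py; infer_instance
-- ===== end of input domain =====

-- B drops A's redundant 16-entry legacy dict and A's two endswith loops: one rpartition split
-- at the last underscore plus a 5-entry tail table gives the same (role, target) pair (objective: simpler).

-- ===== PORT A =====
def pvLegacy : PySem.Dict String (String × String) :=
  PySem.Dict.ofList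
    [ ("include_globs", ("include", "globs"))
    , ("exclude_globs", ("exclude", "globs"))
    , ("force_include_globs", ("force_include", "globs"))
    , ("include_files", ("include", "files"))
    , ("exclude_files", ("exclude", "files"))
    , ("force_include_files", ("force_include", "files"))
    , ("include_dirs", ("include", "dirs"))
    , ("exclude_dirs", ("exclude", "dirs"))
    , ("force_include_dirs", ("force_include", "dirs"))
    , ("watch_globs", ("watch", "globs"))
    , ("watch_files_files", ("watch_files", "files"))
    , ("watch_files_globs", ("watch_files", "globs"))
    , ("watch_files_dirs", ("watch_files", "dirs"))
    , ("tests_watch_globs", ("tests_watch", "globs"))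
    , ("tests_watch_files", ("tests_watch", "files"))
    , ("tests_watch_dirs", ("tests_watch", "dirs")) ]

def pvRoleSuffixes : List String := ["globs", "files", "dirs"]
def pvLegacySuffixes : List String := ["prefixes", "suffixes"]

-- 'for suffix in _ROLE_SUFFIXES: …' with early return
def pvLoop1 (key : String) : List String → Option (String × String)
  | [] => none
  | s :: rest =>
    let marker := "_" ++ s
    if PySem.Str.endswith key marker then
      some (PySem.Str.slice key none (some (-(PySem.Str.len marker))), s)
    else pvLoop1 key rest

-- 'for legacy in _LEGACY_SUFFIXES: …' with early return
def pvLoop2 (key : String) : List String → Option (String × String)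
  | [] => none
  | s :: rest =>
    let marker := "_" ++ s
    if PySem.Str.endswith key marker then
      some (PySem.Str.slice key none (some (-(PySem.Str.len marker))), "globs")
    else pvLoop2 key rest

def role_from_key_py (key : String) : Option (String × String) :=
  match pvLegacy.get? key with
  | some v => some v
  | none =>
    match pvLoop1 key pvRoleSuffixes with
    | some r => some r
    | none => pvLoop2 key pvLegacySuffixes

-- ===== PORT B =====
-- hand port of key.rpartition at the underscore (exact for the use B makes of it:
-- 'none' ↔ empty sep, otherwise (head, tail) around the LAST underscore)
def pvRPartU : List Char → Option (List Char × List Char)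
  | [] => none
  | c :: rest =>
    match pvRPartU rest with
    | some (h, t) => some (c :: h, t)
    | none => if c = '_' then some ([], rest) else none

def pvTable : List (String × String) :=
  [("globs", "globs"), ("files", "files"), ("dirs", "dirs"),
   ("prefixes", "globs"), ("suffixes", "globs")]

def role_from_key_py_alt (key : String) : Option (String × String) :=
  match pvRPartU key.toList with
  | none => none
  | some (h, t) =>
    match pvTable.lookup (String.ofList t) with
    | some tgt => some (String.ofList h, tgt)
    | none => none

-- ===== PRECONDITION & SPEC =====
def Spec_role_from_key_py (key : String) (out : Option (String × String)) : Prop := out = role_from_key_py_alt key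
instance (key : String) (out : Option (String × String)) : Decidable (Spec_role_from_key_py key out) := by unfold Spec_role_from_key_py; infer_instance

-- ===== CLAIM (what is proved, stated in full; the proofs are below) =====
def Claim_equal_role_from_key_py : Prop := ∀ (key : String), Dom_role_from_key_py key → Spec_role_from_key_py key (role_from_key_py key)

-- ===== LEMMAS AND PROOFS =====

theorem rpartU_none (cs : List Char) (hn : pvRPartU cs = none) : '_' ∉ cs := by
  induction cs with
  | nil => simp
  | cons c rest ih =>
    simp only [pvRPartU] at hn
    cases hr : pvRPartU rest with
    | some p => rw [hr] at hn; obtain ⟨h, t⟩ := p; simp at hn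
    | none =>
      simp only [hr] at hn
      split_ifs at hn with hc
      simp only [List.mem_cons, not_or]
      exact ⟨fun he => hc he.symm, ih hr⟩

theorem rpartU_some (cs h t : List Char)
    (hs : pvRPartU cs = some (h, t)) : cs = h ++ '_' :: t ∧ '_' ∉ t := by
  induction cs generalizing h t with
  | nil => simp [pvRPartU] at hs
  | cons c rest ih =>
    simp only [pvRPartU] at hs
    cases hr : pvRPartU rest with
    | some p =>
      obtain ⟨h', t'⟩ := p
      rw [hr] at hs
      simp only [Option.some.injEq, Prod.mk.injEq] at hs
      obtain ⟨hh, htt⟩ := hs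
      obtain ⟨he, hn⟩ := ih h' t' hr
      subst htt; subst hh
      exact ⟨by simp [he], hn⟩
    | none =>
      simp only [hr] at hs
      split_ifs at hs with hc
      · simp only [Option.some.injEq, Prod.mk.injEq] at hs
        obtain ⟨h1, h2⟩ := hs
        exact ⟨by simp [← h1, ← h2, hc], h2 ▸ rpartU_none rest hr⟩

-- the segment after the LAST underscore is unique
theorem last_seg_unique (a b t s : List Char)
    (he : a ++ '_' :: t = b ++ '_' :: s) (ht : '_' ∉ t) (hs : '_' ∉ s) :
    t = s ∧ a = b := by
  have hlen : t.length = s.length := by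
    by_contra hne
    have h1 : ('_' :: t) <:+ (b ++ '_' :: s) := he ▸ List.suffix_append a ('_' :: t)
    have h2 : ('_' :: s) <:+ (b ++ '_' :: s) := List.suffix_append b ('_' :: s)
    rcases List.suffix_or_suffix_of_suffix h1 h2 with ⟨u, hu⟩ | ⟨u, hu⟩
    · cases u with
      | nil => simp at hu; exact hne (by rw [hu])
      | cons x u' =>
        simp only [List.cons_append, List.cons_eq_cons] at hu
        exact hs (hu.2 ▸ (by simp : '_' ∈ u' ++ '_' :: t))
    · cases u with
      | nil => simp at hu; exact hne (by rw [hu])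
      | cons x u' =>
        simp only [List.cons_append, List.cons_eq_cons] at hu
        exact ht (hu.2 ▸ (by simp : '_' ∈ u' ++ '_' :: s))
  have h2 := List.append_inj' he (by simpa using hlen)
  exact ⟨(List.cons_eq_cons.mp h2.2).2, h2.1⟩

theorem toList_marker (w : String) : ("_" ++ w).toList = '_' :: w.toList := by
  rw [String.toList_append]
  rfl

theorem endswith_iff_tail (key w : String) (h t : List Char)
    (hcs : key.toList = h ++ '_' :: t) (ht : '_' ∉ t) (hw : '_' ∉ w.toList) :
    PySem.Str.endswith key ("_" ++ w) = true ↔ t = w.toList := by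
  rw [PySem.Str.endswith_eq, PySem.Chars.endswith_iff, toList_marker]
  constructor
  · rintro ⟨u, hu⟩
    rw [hcs] at hu
    exact (last_seg_unique u h w.toList t hu hw ht).1.symm
  · rintro rfl
    exact ⟨h, hcs.symm⟩

theorem endswith_false_no (key w : String) (hno : '_' ∉ key.toList) :
    PySem.Str.endswith key ("_" ++ w) = false := by
  rw [PySem.Str.endswith_eq]
  rw [show (("_" ++ w).toList) = '_' :: w.toList from toList_marker w]
  cases hb : PySem.Chars.endswith key.toList ('_' :: w.toList) with
  | false => rfl
  | true =>
    obtain ⟨u, hu⟩ := (PySem.Chars.endswith_iff _ _).mp hb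
    exact absurd (by rw [← hu]; simp : '_' ∈ key.toList) hno

theorem slice_head (key w : String) (h t : List Char)
    (hcs : key.toList = h ++ '_' :: t) (hlen : t.length = w.toList.length) :
    PySem.Str.slice key none (some (-(PySem.Str.len ("_" ++ w)))) = String.ofList h := by
  have hlw : PySem.Str.len ("_" ++ w) = ((w.toList.length + 1 : Nat) : Int) := by
    rw [PySem.Str.len_eq, toList_marker]
    simp
  have htl : (PySem.Str.slice key none (some (-(PySem.Str.len ("_" ++ w))))).toList
      = key.toList.take (key.toList.length - (w.toList.length + 1)) := by
    rw [hlw, PySem.Str.toList_slice, PySem.Chars.slice_eq_listSlice]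
    exact PySem.List.slice_to_neg_natCast key.toList (w.toList.length + 1) (Nat.succ_pos _)
  have hkey : key.toList.take (key.toList.length - (w.toList.length + 1)) = h := by
    rw [hcs]
    have hl : (h ++ '_' :: t).length - (w.toList.length + 1) = h.length := by
      simp [List.length_append, ← hlen]
    rw [hl]
    exact List.take_left' rfl
  calc PySem.Str.slice key none (some (-(PySem.Str.len ("_" ++ w))))
      = String.ofList (PySem.Str.slice key none (some (-(PySem.Str.len ("_" ++ w))))).toList :=
        Eq.symm String.ofList_toList
    _ = String.ofList h := by rw [htl, hkey]

theorem endswith_false_of_ne (key w : String) (h t : List Char)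
    (hcs : key.toList = h ++ '_' :: t) (ht : '_' ∉ t) (hw : '_' ∉ w.toList)
    (hne : t ≠ w.toList) : PySem.Str.endswith key ("_" ++ w) = false := by
  cases hb : PySem.Str.endswith key ("_" ++ w) with
  | false => rfl
  | true => exact absurd ((endswith_iff_tail key w h t hcs ht hw).mp hb) hne

theorem beq_ofList_false (w : String) (t : List Char) (hne : t ≠ w.toList) :
    (String.ofList t == w) = false := by
  simp only [beq_eq_false_iff_ne, ne_eq]
  intro he
  exact hne (by rw [← he, String.toList_ofList])

-- ===== VERDICT (by name: the statement is the Claim_ definition above) =====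
theorem role_from_key_py_spec : Claim_equal_role_from_key_py := by
  intro key _
  show role_from_key_py key = role_from_key_py_alt key
  by_cases hk : key ∈ ["include_globs", "exclude_globs", "force_include_globs",
      "include_files", "exclude_files", "force_include_files",
      "include_dirs", "exclude_dirs", "force_include_dirs",
      "watch_globs", "watch_files_files", "watch_files_globs", "watch_files_dirs",
      "tests_watch_globs", "tests_watch_files", "tests_watch_dirs"]
  · simp only [List.mem_cons, List.not_mem_nil, or_false] at hk
    rcases hk with rfl|rfl|rfl|rfl|rfl|rfl|rfl|rfl|rfl|rfl|rfl|rfl|rfl|rfl|rfl|rfl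
    all_goals decide
  · simp only [List.mem_cons, List.not_mem_nil, or_false, not_or] at hk
    obtain ⟨n1,n2,n3,n4,n5,n6,n7,n8,n9,n10,n11,n12,n13,n14,n15,n16⟩ := hk
    have hget : pvLegacy.get? key = none := by
      have hmk : pvLegacy = PySem.Dict.mk
        [ ("include_globs", ("include", "globs"))
        , ("exclude_globs", ("exclude", "globs"))
        , ("force_include_globs", ("force_include", "globs"))
        , ("include_files", ("include", "files"))
        , ("exclude_files", ("exclude", "files"))
        , ("force_include_files", ("force_include", "files"))
        , ("include_dirs", ("include", "dirs"))
        , ("exclude_dirs", ("exclude", "dirs"))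
        , ("force_include_dirs", ("force_include", "dirs"))
        , ("watch_globs", ("watch", "globs"))
        , ("watch_files_files", ("watch_files", "files"))
        , ("watch_files_globs", ("watch_files", "globs"))
        , ("watch_files_dirs", ("watch_files", "dirs"))
        , ("tests_watch_globs", ("tests_watch", "globs"))
        , ("tests_watch_files", ("tests_watch", "files"))
        , ("tests_watch_dirs", ("tests_watch", "dirs")) ] := by decide
      rw [hmk]
      simp [beq_iff_eq,
        Ne.symm n1, Ne.symm n2, Ne.symm n3, Ne.symm n4, Ne.symm n5, Ne.symm n6,
        Ne.symm n7, Ne.symm n8, Ne.symm n9, Ne.symm n10, Ne.symm n11, Ne.symm n12,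
        Ne.symm n13, Ne.symm n14, Ne.symm n15, Ne.symm n16, PySem.Dict.get?]
    cases hrp : pvRPartU key.toList with
    | none =>
      have hno := rpartU_none _ hrp
      have e1 := endswith_false_no key "globs" hno
      have e2 := endswith_false_no key "files" hno
      have e3 := endswith_false_no key "dirs" hno
      have e4 := endswith_false_no key "prefixes" hno
      have e5 := endswith_false_no key "suffixes" hno
      simp only [role_from_key_py, role_from_key_py_alt, hget, hrp]
      simp at e1 e2 e3 e4 e5
      simp [pvLoop1, pvLoop2, pvRoleSuffixes, pvLegacySuffixes, e1, e2, e3, e4, e5]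
    | some p =>
      obtain ⟨h, t⟩ := p
      obtain ⟨hcs, ht⟩ := rpartU_some _ _ _ hrp
      simp only [role_from_key_py, role_from_key_py_alt, hget, hrp]
      by_cases h1 : t = "globs".toList
      · subst h1
        have eg : PySem.Str.endswith key ("_" ++ "globs") = true :=
          (endswith_iff_tail key "globs" h _ hcs ht (by decide)).mpr rfl
        have sg := slice_head key "globs" h _ hcs rfl
        simp at eg sg
        simp [pvLoop1, pvRoleSuffixes, eg, sg, pvTable]
      by_cases h2 : t = "files".toList
      · subst h2
        have e1 := endswith_false_of_ne key "globs" h _ hcs ht (by decide) (by decide)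
        have ef : PySem.Str.endswith key ("_" ++ "files") = true :=
          (endswith_iff_tail key "files" h _ hcs ht (by decide)).mpr rfl
        have sf := slice_head key "files" h _ hcs rfl
        simp at e1 ef sf
        simp [pvLoop1, pvRoleSuffixes, e1, ef, sf, pvTable, List.lookup]
      by_cases h3 : t = "dirs".toList
      · subst h3
        have e1 := endswith_false_of_ne key "globs" h _ hcs ht (by decide) (by decide)
        have e2 := endswith_false_of_ne key "files" h _ hcs ht (by decide) (by decide)
        have ed : PySem.Str.endswith key ("_" ++ "dirs") = true :=
          (endswith_iff_tail key "dirs" h _ hcs ht (by decide)).mpr rfl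
        have sd := slice_head key "dirs" h _ hcs rfl
        simp at e1 e2 ed sd
        simp [pvLoop1, pvRoleSuffixes, e1, e2, ed, sd, pvTable, List.lookup]
      by_cases h4 : t = "prefixes".toList
      · subst h4
        have e1 := endswith_false_of_ne key "globs" h _ hcs ht (by decide) (by decide)
        have e2 := endswith_false_of_ne key "files" h _ hcs ht (by decide) (by decide)
        have e3 := endswith_false_of_ne key "dirs" h _ hcs ht (by decide) (by decide)
        have ep : PySem.Str.endswith key ("_" ++ "prefixes") = true :=
          (endswith_iff_tail key "prefixes" h _ hcs ht (by decide)).mpr rfl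
        have sp := slice_head key "prefixes" h _ hcs rfl
        simp at e1 e2 e3 ep sp
        simp [pvLoop1, pvLoop2, pvRoleSuffixes, pvLegacySuffixes, e1, e2, e3, ep, sp, pvTable, List.lookup]
      by_cases h5 : t = "suffixes".toList
      · subst h5
        have e1 := endswith_false_of_ne key "globs" h _ hcs ht (by decide) (by decide)
        have e2 := endswith_false_of_ne key "files" h _ hcs ht (by decide) (by decide)
        have e3 := endswith_false_of_ne key "dirs" h _ hcs ht (by decide) (by decide)
        have e4 := endswith_false_of_ne key "prefixes" h _ hcs ht (by decide) (by decide)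
        have es : PySem.Str.endswith key ("_" ++ "suffixes") = true :=
          (endswith_iff_tail key "suffixes" h _ hcs ht (by decide)).mpr rfl
        have ss := slice_head key "suffixes" h _ hcs rfl
        simp at e1 e2 e3 e4 es ss
        simp [pvLoop1, pvLoop2, pvRoleSuffixes, pvLegacySuffixes, e1, e2, e3, e4, es, ss, pvTable, List.lookup]
      · have e1 := endswith_false_of_ne key "globs" h _ hcs ht (by decide) h1
        have e2 := endswith_false_of_ne key "files" h _ hcs ht (by decide) h2
        have e3 := endswith_false_of_ne key "dirs" h _ hcs ht (by decide) h3
        have e4 := endswith_false_of_ne key "prefixes" h _ hcs ht (by decide) h4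
        have e5 := endswith_false_of_ne key "suffixes" h _ hcs ht (by decide) h5
        simp at e1 e2 e3 e4 e5
        simp [pvLoop1, pvLoop2, pvRoleSuffixes, pvLegacySuffixes, e1, e2, e3, e4, e5,
          pvTable, List.lookup,
          beq_ofList_false "globs" t h1, beq_ofList_false "files" t h2,
          beq_ofList_false "dirs" t h3, beq_ofList_false "prefixes" t h4,
          beq_ofList_false "suffixes" t h5]
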